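-- pv_equiv track=rewrite | github.com/FabioSeixas/CassavaPy | dependencias/exp_functions.py | not_fix_PlantHarv
-- ===== SOURCE A (Python) =====
-- def not_fix_PlantHarv(planting, harvest):
--
--     matrix = []
--     for i, plant_date in enumerate(planting):
--         for n, harv in enumerate(harvest):
--             temp = [i + 1, n + 1]
--             matrix.append(temp)
--
--     assert len(matrix) < 100, "Quantidade de tratamentos ultrapassa o valor máximo (99)."
--
--     return matrix
-- ===== SOURCE B (Python) =====
-- def not_fix_PlantHarv(planting, harvest):
--     m = len(planting)
--     n = len(harvest)
--     matrix = [[k // n + 1, k % n + 1] for k in range(m * n)]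
--     assert len(matrix) < 100, "Quantidade de tratamentos ultrapassa o valor máximo (99)."
--     return matrix
-- ===== Notes on version B (the rewrite author's own statement) =====
-- stated objective: alternative
-- what changed: Replaces the two nested enumerate loops with a single flat comprehension over range(m*n), recovering row and column via divmod index arithmetic.
import Mathlib
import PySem

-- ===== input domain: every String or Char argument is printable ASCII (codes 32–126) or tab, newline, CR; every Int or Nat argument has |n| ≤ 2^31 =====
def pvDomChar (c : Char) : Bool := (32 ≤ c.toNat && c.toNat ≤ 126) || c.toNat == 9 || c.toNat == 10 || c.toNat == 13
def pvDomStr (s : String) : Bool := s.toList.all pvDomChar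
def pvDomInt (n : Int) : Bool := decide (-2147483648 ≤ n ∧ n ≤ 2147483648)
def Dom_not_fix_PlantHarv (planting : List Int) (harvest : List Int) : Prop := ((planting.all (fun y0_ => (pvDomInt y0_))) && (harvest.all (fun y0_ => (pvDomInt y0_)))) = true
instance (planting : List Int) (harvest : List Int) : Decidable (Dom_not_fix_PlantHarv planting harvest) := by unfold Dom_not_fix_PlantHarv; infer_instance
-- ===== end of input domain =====

-- B replaces A's two nested enumerate loops by one flat pass over range(m*n) with divmod
-- index arithmetic (same asymptotic cost; objective: alternative decomposition).

-- ===== PORT A =====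
-- nested loops: for i, _ in enumerate(planting): for n, _ in enumerate(harvest): matrix.append([i+1, n+1])
def not_fix_PlantHarv (planting : List Int) (harvest : List Int) : List (List Int) :=
  (PySem.List.enumerate planting).foldl
    (fun matrix p =>
      (PySem.List.enumerate harvest).foldl
        (fun matrix q => matrix ++ [[p.1 + 1, q.1 + 1]]) matrix)
    []

-- ===== PORT B =====
-- matrix = [[k // n + 1, k % n + 1] for k in range(m * n)]
def not_fix_PlantHarv_alt (planting : List Int) (harvest : List Int) : List (List Int) :=
  let m : Int := planting.length
  let n : Int := harvest.length
  (PySem.List.pyRange 0 (m * n) 1).map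
    (fun k => [PySem.Int.floordiv k n + 1, PySem.Int.mod k n + 1])

-- ===== PRECONDITION & SPEC =====
-- Pre_ excludes exactly the inputs on which A raises AssertionError:
-- len(planting) * len(harvest) >= 100 (the matrix would have 100 or more rows; B raises there too).
def Pre_not_fix_PlantHarv (planting : List Int) (harvest : List Int) : Prop :=
  planting.length * harvest.length < 100
instance (planting : List Int) (harvest : List Int) : Decidable (Pre_not_fix_PlantHarv planting harvest) := by unfold Pre_not_fix_PlantHarv; infer_instance

def pvWitness_not_fix_PlantHarv : List Int × List Int := ([10, 20], [3, 4, 5])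

def Spec_not_fix_PlantHarv (planting : List Int) (harvest : List Int) (out : List (List Int)) : Prop := out = not_fix_PlantHarv_alt planting harvest
instance (planting : List Int) (harvest : List Int) (out : List (List Int)) : Decidable (Spec_not_fix_PlantHarv planting harvest out) := by unfold Spec_not_fix_PlantHarv; infer_instance

-- ===== CLAIM (what is proved, stated in full; the proofs are below) =====
def Claim_equal_not_fix_PlantHarv : Prop := ∀ (planting : List Int) (harvest : List Int), Dom_not_fix_PlantHarv planting harvest → Pre_not_fix_PlantHarv planting harvest → Spec_not_fix_PlantHarv planting harvest (not_fix_PlantHarv planting harvest)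

-- ===== LEMMAS AND PROOFS =====
-- both ports are reduced to the same closed-form grid pvGrid

def pvGrid (m n : Nat) : List (List Int) :=
  (List.range m).flatMap (fun i : Nat => (List.range n).map (fun j : Nat => [(i : Int) + 1, (j : Int) + 1]))

theorem pv_inner_gen (harvest : List Int) (i s : Int) (acc : List (List Int)) :
    (PySem.List.enumerate harvest s).foldl (fun matrix q => matrix ++ [[i + 1, q.1 + 1]]) acc
      = acc ++ (List.range harvest.length).map (fun j : Nat => [i + 1, s + (j : Int) + 1]) := by
  induction harvest generalizing s acc with
  | nil => simp [PySem.List.enumerate_nil]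
  | cons x xs ih =>
    rw [PySem.List.enumerate_cons, List.foldl_cons, ih, List.length_cons,
      List.range_succ_eq_map, List.map_cons, List.map_map, List.append_assoc,
      List.singleton_append]
    congr 2
    · norm_num
    apply List.map_congr_left; intro j _
    simp only [Function.comp_apply]; push_cast; ring_nf

theorem pv_inner (harvest : List Int) (i : Int) (acc : List (List Int)) :
    (PySem.List.enumerate harvest 0).foldl (fun matrix q => matrix ++ [[i + 1, q.1 + 1]]) acc
      = acc ++ (List.range harvest.length).map (fun j : Nat => [i + 1, (j : Int) + 1]) := by
  rw [pv_inner_gen]; simp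

theorem pv_outer_gen (planting harvest : List Int) (s : Int) (acc : List (List Int)) :
    (PySem.List.enumerate planting s).foldl
      (fun matrix p =>
        (PySem.List.enumerate harvest).foldl
          (fun matrix q => matrix ++ [[p.1 + 1, q.1 + 1]]) matrix) acc
    = acc ++ (List.range planting.length).flatMap
        (fun i : Nat => (List.range harvest.length).map (fun j : Nat => [s + (i : Int) + 1, (j : Int) + 1])) := by
  induction planting generalizing s acc with
  | nil => simp [PySem.List.enumerate_nil]
  | cons x xs ih =>
    rw [PySem.List.enumerate_cons, List.foldl_cons, pv_inner, ih, List.length_cons,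
      List.range_succ_eq_map, List.flatMap_cons, List.flatMap_map, List.append_assoc]
    congr 2
    · norm_num
    apply List.flatMap_congr; intro i _
    apply List.map_congr_left; intro j _
    push_cast; ring_nf

theorem pv_a_eq (planting harvest : List Int) :
    not_fix_PlantHarv planting harvest = pvGrid planting.length harvest.length := by
  unfold not_fix_PlantHarv pvGrid
  rw [pv_outer_gen]
  simp

theorem pv_b_grid (m n : Nat) :
    (List.range (m * n)).map
        (fun k : Nat => [((k / n : Nat) : Int) + 1, ((k % n : Nat) : Int) + 1])
      = pvGrid m n := by
  induction m with
  | zero => simp [pvGrid]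
  | succ m ih =>
    rcases Nat.eq_zero_or_pos n with hn | hn
    · subst hn; simp [pvGrid]
    · have hsplit : pvGrid (m + 1) n
          = pvGrid m n ++ (List.range n).map (fun j : Nat => [(m : Int) + 1, (j : Int) + 1]) := by
        unfold pvGrid
        rw [List.range_succ, List.flatMap_append, List.flatMap_singleton]
      rw [Nat.succ_mul, List.range_add, List.map_append, ih, List.map_map, hsplit]
      congr 1
      apply List.map_congr_left; intro j hj
      simp only [List.mem_range] at hj
      simp only [Function.comp_apply]
      have h1 : m * n + j = j + n * m := by ring
      rw [h1, Nat.add_mul_div_left _ _ hn, Nat.div_eq_of_lt hj,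
        Nat.add_mul_mod_self_left, Nat.mod_eq_of_lt hj]
      norm_num

theorem pv_b_eq (planting harvest : List Int) :
    not_fix_PlantHarv_alt planting harvest = pvGrid planting.length harvest.length := by
  show (PySem.List.pyRange 0 ((planting.length : Int) * (harvest.length : Int)) 1).map
      (fun k => [PySem.Int.floordiv k (harvest.length : Int) + 1,
                 PySem.Int.mod k (harvest.length : Int) + 1])
    = pvGrid planting.length harvest.length
  rw [PySem.List.pyRange_one, List.map_map]
  have ht : (((planting.length : Int)) * ((harvest.length : Int)) - 0).toNat
      = planting.length * harvest.length := by omega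
  rw [ht, ← pv_b_grid]
  apply List.map_congr_left; intro k _
  simp [PySem.Int.floordiv_natCast, PySem.Int.mod_natCast]

-- ===== VERDICT (by name: the statement is the Claim_ definition above) =====
theorem not_fix_PlantHarv_spec : Claim_equal_not_fix_PlantHarv := by
  intro planting harvest _ _
  unfold Spec_not_fix_PlantHarv
  rw [pv_a_eq, pv_b_eq]
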